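-- pv_equiv track=rewrite | github.com/isteiger999/StraightUP | generate_beep_schedule_5m15s.py | build_movement_plan
-- ===== SOURCE A (Python) =====
-- def build_movement_base(movements_csv):
--     if movements_csv:
--         base = [m.strip() for m in movements_csv.split(",") if m.strip()]
--         if not base:
--             base = None
--         else:
--             return base
--     # Default plan ends with reach_right on purpose
--     return [
--         "normal_slouch","fast_slouch","micro_slouch",
--         "lateral_left","lateral_right",
--         "neck_only",
--         "reach_left","reach_right"
--     ]
--
-- def build_movement_plan(total_cycles, movements_csv, complete_plan):
--     base = build_movement_base(movements_csv)
--     L = len(base)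
--     if complete_plan:
--         # Extend to the smallest multiple of L that is >= total_cycles
--         k = (total_cycles + L - 1) // L  # ceil
--         total_cycles = max(L, k * L)
--     plan = [base[i % L] for i in range(total_cycles)]
--     return plan, total_cycles, base
-- ===== SOURCE B (Python) =====
-- def build_movement_base(movements_csv):
--     if movements_csv:
--         base = [m.strip() for m in movements_csv.split(",") if m.strip()]
--         if not base:
--             base = None
--         else:
--             return base
--     # Default plan ends with reach_right on purpose
--     return [
--         "normal_slouch","fast_slouch","micro_slouch",
--         "lateral_left","lateral_right",
--         "neck_only",
--         "reach_left","reach_right"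
--     ]
--
-- def build_movement_plan(total_cycles, movements_csv, complete_plan):
--     base = build_movement_base(movements_csv)
--     L = len(base)
--     if complete_plan:
--         k = (total_cycles + L - 1) // L  # ceil
--         total_cycles = max(L, k * L)
--     # build the plan with a rotation queue: emit the head, rotate the queue
--     plan = []
--     rot = base
--     while len(plan) < total_cycles:
--         plan.append(rot[0])
--         rot = rot[1:] + rot[:1]
--     return plan, total_cycles, base
-- ===== Notes on version B (the rewrite author's own statement) =====
-- stated objective: alternative
-- what changed: The per-index comprehension base[i % L] over range(total_cycles) is replaced by a rotation-queue loop: repeatedly emit the head of a rotating copy of base and rotate it by one, so no modulo indexing is performed.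
import Mathlib
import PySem

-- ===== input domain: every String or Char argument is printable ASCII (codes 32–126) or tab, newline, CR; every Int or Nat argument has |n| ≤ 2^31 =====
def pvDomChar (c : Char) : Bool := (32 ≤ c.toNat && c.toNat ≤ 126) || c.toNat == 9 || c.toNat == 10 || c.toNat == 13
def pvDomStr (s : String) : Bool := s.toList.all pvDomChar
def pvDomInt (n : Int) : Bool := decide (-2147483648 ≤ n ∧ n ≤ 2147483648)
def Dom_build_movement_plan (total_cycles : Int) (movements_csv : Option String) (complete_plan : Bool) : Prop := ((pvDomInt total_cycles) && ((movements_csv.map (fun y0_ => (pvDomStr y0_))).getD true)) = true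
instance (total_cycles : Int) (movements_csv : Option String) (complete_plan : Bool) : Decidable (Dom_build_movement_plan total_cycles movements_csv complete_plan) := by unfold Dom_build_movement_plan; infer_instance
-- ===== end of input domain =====

-- B builds the cyclic plan with a rotation queue (emit the head, rotate by one) instead of
-- indexing base[i % L] for every position; objective: alternative.


-- ===== PORT A =====
-- helper: build_movement_base (shared source code of A and B; B keeps it unchanged)
def pyDefaultBase : List String :=
  ["normal_slouch","fast_slouch","micro_slouch",
   "lateral_left","lateral_right",
   "neck_only",
   "reach_left","reach_right"]

def pyBuildMovementBase (movements_csv : Option String) : List String :=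
  match movements_csv with
  | none => pyDefaultBase                -- None is falsy
  | some s =>
    if s = "" then pyDefaultBase         -- empty string is falsy
    else
      -- [m.strip() for m in s.split(",") if m.strip()]   (sep "," ≠ "", so split? is always some; getD [] never fires)
      let base := (((PySem.Str.split? s ",").getD []).filter (fun m => PySem.Str.strip m != "")).map PySem.Str.strip
      if base = [] then pyDefaultBase else base

-- port of A: per-index comprehension base[i % L] over range(total_cycles)
-- (base[i % L] never raises since 0 ≤ i % L < L with L > 0, so pyGetD with default "" is exact)
def build_movement_plan (total_cycles : Int) (movements_csv : Option String) (complete_plan : Bool) : List String × Int × List String :=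
  let base := pyBuildMovementBase movements_csv
  let L : Int := base.length
  let tc : Int := if complete_plan then max L (PySem.Int.floordiv (total_cycles + L - 1) L * L) else total_cycles
  let plan := (PySem.List.pyRange 0 tc 1).map (fun i => PySem.List.pyGetD base (PySem.Int.mod i L) "")
  (plan, tc, base)

-- ===== PORT B =====
-- port of B's while loop: 'while len(plan) < total_cycles: plan.append(rot[0]); rot = rot[1:] + rot[:1]'
-- (rot[0] never raises since rot stays a rotation of the nonempty base, so pyGetD with default "" is exact)
def pyRotLoop (tc : Int) (plan rot : List String) : List String :=
  if (plan.length : Int) < tc then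
    pyRotLoop tc (plan ++ [PySem.List.pyGetD rot 0 ""])
      (PySem.List.slice rot (some 1) none ++ PySem.List.slice rot none (some 1))
  else plan
termination_by (tc - plan.length).toNat
decreasing_by simp only [List.length_append, List.length_cons, List.length_nil]; omega

def build_movement_plan_alt (total_cycles : Int) (movements_csv : Option String) (complete_plan : Bool) : List String × Int × List String :=
  let base := pyBuildMovementBase movements_csv
  let L : Int := base.length
  let tc : Int := if complete_plan then max L (PySem.Int.floordiv (total_cycles + L - 1) L * L) else total_cycles
  (pyRotLoop tc [] base, tc, base)

-- ===== PRECONDITION & SPEC =====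
def Spec_build_movement_plan (total_cycles : Int) (movements_csv : Option String) (complete_plan : Bool) (out : List String × Int × List String) : Prop := out = build_movement_plan_alt total_cycles movements_csv complete_plan
instance (total_cycles : Int) (movements_csv : Option String) (complete_plan : Bool) (out : List String × Int × List String) : Decidable (Spec_build_movement_plan total_cycles movements_csv complete_plan out) := by unfold Spec_build_movement_plan; infer_instance

-- ===== CLAIM (what is proved, stated in full; the proofs are below) =====
def Claim_equal_build_movement_plan : Prop := ∀ (total_cycles : Int) (movements_csv : Option String) (complete_plan : Bool), Dom_build_movement_plan total_cycles movements_csv complete_plan → Spec_build_movement_plan total_cycles movements_csv complete_plan (build_movement_plan total_cycles movements_csv complete_plan)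

-- ===== LEMMAS AND PROOFS =====

lemma pyBuildMovementBase_ne_nil (movements_csv : Option String) : pyBuildMovementBase movements_csv ≠ [] := by
  unfold pyBuildMovementBase pyDefaultBase
  cases movements_csv with
  | none => simp
  | some s =>
    simp only []
    split_ifs with h1 h2 <;> simp_all

-- the rotation loop produces exactly the per-index cyclic listing
lemma pyRotLoop_eq (tc : Int) : ∀ (m : Nat) (plan rot : List String), rot ≠ [] →
    (tc - plan.length).toNat = m →
    pyRotLoop tc plan rot = plan ++ (List.range m).map (fun j => rot.getD (j % rot.length) "") := by
  intro m
  induction m with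
  | zero =>
    intro plan rot _ hm
    rw [pyRotLoop]
    rw [if_neg (by omega)]
    simp
  | succ m ih =>
    intro plan rot hrot hm
    have hL : 0 < rot.length := List.length_pos_iff.mpr hrot
    have hlt : (plan.length : Int) < tc := by omega
    rw [pyRotLoop, if_pos hlt]
    have hslice : PySem.List.slice rot (some 1) none ++ PySem.List.slice rot none (some 1)
        = rot.rotate 1 := by
      rw [List.rotate_eq_drop_append_take (by omega)]
      simp [PySem.List.slice_from_one, PySem.List.slice_to, List.drop_one]
    rw [hslice]
    rw [ih (plan ++ [PySem.List.pyGetD rot 0 ""]) (rot.rotate 1)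
      (by simp [← List.length_pos_iff]; exact hL) (by simp; omega)]
    rw [List.range_succ_eq_map, List.map_cons, List.map_map, List.append_assoc]
    congr 1
    rw [List.cons_append, List.nil_append]
    congr 1
    · rw [PySem.List.pyGetD_zero]
      simp [List.getD_eq_getElem?_getD]
    · apply List.map_congr_left
      intro j _
      have h1 : j.succ % rot.length < rot.length := Nat.mod_lt _ hL
      have h2 : j % (rot.rotate 1).length < (rot.rotate 1).length := by
        rw [List.length_rotate]; exact Nat.mod_lt _ hL
      simp only [Function.comp_apply, List.getD_eq_getElem?_getD,
        List.getElem?_eq_getElem h1, List.getElem?_eq_getElem h2, Option.getD_some]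
      rw [List.getElem_rotate]
      congr 1
      rw [List.length_rotate, Nat.mod_add_mod, Nat.succ_eq_add_one]

-- A's comprehension, written over List.range on naturals
lemma planA_eq (base : List String) (tc : Int) :
    (PySem.List.pyRange 0 tc 1).map (fun i => PySem.List.pyGetD base (PySem.Int.mod i (base.length : Int)) "")
      = (List.range tc.toNat).map (fun k => base.getD (k % base.length) "") := by
  rw [PySem.List.pyRange_one, List.map_map]
  have : ((tc - 0).toNat) = tc.toNat := by omega
  rw [this]
  apply List.map_congr_left
  intro k _
  simp only [Function.comp_apply, zero_add, PySem.Int.mod_natCast, PySem.List.pyGetD_natCast]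

-- for any nonempty base and any (already adjusted) cycle count: the two plan expressions agree
lemma plans_eq (base : List String) (hb : base ≠ []) (tc : Int) :
    (PySem.List.pyRange 0 tc 1).map (fun i => PySem.List.pyGetD base (PySem.Int.mod i (base.length : Int)) "")
      = pyRotLoop tc [] base := by
  rw [planA_eq, pyRotLoop_eq tc tc.toNat [] base hb (by simp)]
  simp [List.getD_eq_getElem?_getD]

-- ===== VERDICT (by name: the statement is the Claim_ definition above) =====
theorem build_movement_plan_spec : Claim_equal_build_movement_plan := by
  intro total_cycles movements_csv complete_plan _
  unfold Spec_build_movement_plan build_movement_plan build_movement_plan_alt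
  have hb := pyBuildMovementBase_ne_nil movements_csv
  simp only []
  exact Prod.ext (plans_eq _ hb _) rfl
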